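-- pv_equiv track=rewrite | github.com/bnbbbb/Algotithm | 프로그래머스/unrated/172927. 광물 캐기/광물 캐기.py | solution
-- ===== SOURCE A (Python) =====
-- def solution(picks, minerals):
--     answer = 0
--     di = {'diamond': 1, 'iron': 1, 'stone': 1}
--     ir = {'diamond': 5, 'iron': 1, 'stone': 1}
--     st = {'diamond': 25, 'iron': 5, 'stone': 1}
--     dic = {'diamond': picks[0], 'iron': picks[1], 'stone': picks[2]}
--     sum_pick = sum(picks)
--     count = []
--
--     for i in range(0, min(len(minerals), sum_pick*5), 5):
--         dia = minerals[i:i+5].count('diamond')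
--         iron = minerals[i:i+5].count('iron')
--         stone = minerals[i:i+5].count('stone')
--         count.append((i, dia, iron, stone))
--     count.sort(key = lambda x: (x[1], x[2], x[3]), reverse=True)
--
--     for i in count:
--         if dic['diamond'] > 0:
--             answer += i[1] + i[2] + i[3]
--             dic['diamond'] -=1
--         elif dic['iron'] > 0:
--             answer += i[1] * 5 + i[2] + i[3]
--             dic['iron'] -=1
--         else:
--             answer += i[1] * 25 + i[2] * 5 + i[3]
--             dic['stone'] -=1
--     return answer
-- ===== SOURCE B (Python) =====
-- def solution(picks, minerals):
--     # Counting/bucket approach: tally each 5-mineral group into a bucket keyed by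
--     # (diamond, iron, stone) counts, then walk the bounded key space in descending
--     # lexicographic order, assigning picks greedily with arithmetic (no comparison sort).
--     sum_pick = sum(picks)
--     limit = min(len(minerals), sum_pick * 5)
--     buckets = {}
--     for i in range(0, limit, 5):
--         chunk = minerals[i:i+5]
--         key = (chunk.count('diamond'), chunk.count('iron'), chunk.count('stone'))
--         buckets[key] = buckets.get(key, 0) + 1
--     answer = 0
--     d = picks[0]
--     it = picks[1]
--     for dia in range(5, -1, -1):
--         for iron in range(5 - dia, -1, -1):
--             for stone in range(5 - dia - iron, -1, -1):
--                 c = buckets.get((dia, iron, stone), 0)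
--                 use_d = min(c, d) if d > 0 else 0
--                 c -= use_d
--                 d -= use_d
--                 use_i = min(c, it) if it > 0 else 0
--                 c -= use_i
--                 it -= use_i
--                 answer += use_d * (dia + iron + stone)
--                 answer += use_i * (dia * 5 + iron + stone)
--                 answer += c * (dia * 25 + iron * 5 + stone)
--     return answer
-- ===== Notes on version B (the rewrite author's own statement) =====
-- stated objective: alternative
-- what changed: B replaces A's comparison sort of the per-5-minerals count tuples by a bucket counter keyed by the bounded (diamond, iron, stone) count space, walks that key space in descending lexicographic order, and assigns the diamond/iron picks per bucket with closed-form min-arithmetic instead of A's per-group greedy loop over the sorted list.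
import Mathlib
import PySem

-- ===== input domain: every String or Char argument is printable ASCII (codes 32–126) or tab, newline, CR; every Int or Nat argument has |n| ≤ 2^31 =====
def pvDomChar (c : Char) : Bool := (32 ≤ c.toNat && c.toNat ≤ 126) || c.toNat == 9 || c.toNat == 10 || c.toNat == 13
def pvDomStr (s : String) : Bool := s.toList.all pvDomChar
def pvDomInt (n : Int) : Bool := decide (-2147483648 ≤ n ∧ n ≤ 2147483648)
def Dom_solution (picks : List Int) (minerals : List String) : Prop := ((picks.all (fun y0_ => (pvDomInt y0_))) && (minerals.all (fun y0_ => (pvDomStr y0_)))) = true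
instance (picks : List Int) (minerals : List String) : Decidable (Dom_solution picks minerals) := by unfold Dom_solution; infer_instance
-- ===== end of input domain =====

-- B replaces A's comparison sort of the 5-mineral groups by a bucket count over the bounded
-- (diamond, iron, stone) key space walked in descending order, with the greedy assignment done
-- arithmetically per bucket (objective: alternative — a sort-free algorithm of comparable measured cost).

-- ===== PORT A =====
-- Python tuple comparison is lexicographic: the sort key (x[1], x[2], x[3]) is modelled
-- exactly by Prod.Lex (toLex) on Int × Int × Int.
def solution (picks : List Int) (minerals : List String) : Int :=
  let answer : Int := 0
  let _di : PySem.Dict String Int := ((PySem.Dict.empty.insert "diamond" 1).insert "iron" 1).insert "stone" 1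
  let _ir : PySem.Dict String Int := ((PySem.Dict.empty.insert "diamond" 5).insert "iron" 1).insert "stone" 1
  let _st : PySem.Dict String Int := ((PySem.Dict.empty.insert "diamond" 25).insert "iron" 5).insert "stone" 1
  let dic : PySem.Dict String Int :=
    ((PySem.Dict.empty.insert "diamond" (PySem.List.pyGetD picks 0 0)).insert "iron"
        (PySem.List.pyGetD picks 1 0)).insert "stone" (PySem.List.pyGetD picks 2 0)
  let sum_pick : Int := picks.sum
  let count : List (Int × Int × Int × Int) :=
    (PySem.List.pyRange 0 (min (PySem.List.len minerals) (sum_pick * 5)) 5).foldl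
      (fun acc i =>
        let dia : Int := (PySem.List.count (PySem.List.slice minerals (some i) (some (i + 5))) "diamond" : Int)
        let iron : Int := (PySem.List.count (PySem.List.slice minerals (some i) (some (i + 5))) "iron" : Int)
        let stone : Int := (PySem.List.count (PySem.List.slice minerals (some i) (some (i + 5))) "stone" : Int)
        acc ++ [(i, dia, iron, stone)]) []
  let count := PySem.List.sorted count (fun x => toLex (x.2.1, toLex (x.2.2.1, x.2.2.2))) true
  let res :=
    count.foldl
      (fun (s : Int × PySem.Dict String Int) i =>
        let answer := s.1
        let dic := s.2
        if dic.getD "diamond" 0 > 0 then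
          (answer + i.2.1 + i.2.2.1 + i.2.2.2, dic.insert "diamond" (dic.getD "diamond" 0 - 1))
        else if dic.getD "iron" 0 > 0 then
          (answer + i.2.1 * 5 + i.2.2.1 + i.2.2.2, dic.insert "iron" (dic.getD "iron" 0 - 1))
        else
          (answer + i.2.1 * 25 + i.2.2.1 * 5 + i.2.2.2, dic.insert "stone" (dic.getD "stone" 0 - 1)))
      (answer, dic)
  res.1

-- ===== PORT B =====
def solution_alt (picks : List Int) (minerals : List String) : Int :=
  let sum_pick : Int := picks.sum
  let limit : Int := min (PySem.List.len minerals) (sum_pick * 5)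
  let buckets : PySem.Dict (Int × Int × Int) Int :=
    (PySem.List.pyRange 0 limit 5).foldl
      (fun d i =>
        let chunk := PySem.List.slice minerals (some i) (some (i + 5))
        let key : Int × Int × Int :=
          ((PySem.List.count chunk "diamond" : Int), (PySem.List.count chunk "iron" : Int),
            (PySem.List.count chunk "stone" : Int))
        d.insert key (d.getD key 0 + 1))
      PySem.Dict.empty
  let answer : Int := 0
  let d : Int := PySem.List.pyGetD picks 0 0
  let it : Int := PySem.List.pyGetD picks 1 0
  let res :=
    (PySem.List.pyRange 5 (-1) (-1)).foldl
      (fun (s : Int × Int × Int) dia =>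
        (PySem.List.pyRange (5 - dia) (-1) (-1)).foldl
          (fun (s : Int × Int × Int) iron =>
            (PySem.List.pyRange (5 - dia - iron) (-1) (-1)).foldl
              (fun (s : Int × Int × Int) stone =>
                let c0 : Int := buckets.getD (dia, iron, stone) 0
                let use_d : Int := if s.2.1 > 0 then min c0 s.2.1 else 0
                let c1 : Int := c0 - use_d
                let d' : Int := s.2.1 - use_d
                let use_i : Int := if s.2.2 > 0 then min c1 s.2.2 else 0
                let c2 : Int := c1 - use_i
                let it' : Int := s.2.2 - use_i
                (s.1 + use_d * (dia + iron + stone) + use_i * (dia * 5 + iron + stone) +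
                    c2 * (dia * 25 + iron * 5 + stone), d', it'))
              s)
          s)
      (answer, d, it)
  res.1

-- ===== PRECONDITION & SPEC =====
-- Pre_ excludes only the inputs where the Python A raises IndexError: picks must have
-- at least the three entries picks[0], picks[1], picks[2] that A reads.
def Pre_solution (picks : List Int) (minerals : List String) : Prop := 3 ≤ picks.length
instance (picks : List Int) (minerals : List String) : Decidable (Pre_solution picks minerals) := by unfold Pre_solution; infer_instance
def pvWitness_solution : List Int × List String := ([1, 1, 1], ["diamond", "stone", "iron", "iron", "stone", "stone"])

def Spec_solution (picks : List Int) (minerals : List String) (out : Int) : Prop := out = solution_alt picks minerals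
instance (picks : List Int) (minerals : List String) (out : Int) : Decidable (Spec_solution picks minerals out) := by unfold Spec_solution; infer_instance

-- ===== CLAIM (what is proved, stated in full; the proofs are below) =====
def Claim_equal_solution : Prop := ∀ (picks : List Int) (minerals : List String), Dom_solution picks minerals → Pre_solution picks minerals → Spec_solution picks minerals (solution picks minerals)

-- ===== LEMMAS AND PROOFS =====

-- the (dia, iron, stone) key of the 5-mineral group starting at index i
def pvKey (minerals : List String) (i : Int) : Int × Int × Int :=
  ((PySem.List.count (PySem.List.slice minerals (some i) (some (i + 5))) "diamond" : Int),
    (PySem.List.count (PySem.List.slice minerals (some i) (some (i + 5))) "iron" : Int),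
    (PySem.List.count (PySem.List.slice minerals (some i) (some (i + 5))) "stone" : Int))

def pvKeyOf (t : Int × Int × Int × Int) : Int × Int × Int := (t.2.1, t.2.2.1, t.2.2.2)

def pvLex (k : Int × Int × Int) : Int ×ₗ (Int ×ₗ Int) := toLex (k.1, toLex (k.2.1, k.2.2))

-- one greedy step on abstract state (answer, diamond picks left, iron picks left)
def pvG (s : Int × Int × Int) (k : Int × Int × Int) : Int × Int × Int :=
  if s.2.1 > 0 then (s.1 + k.1 + k.2.1 + k.2.2, s.2.1 - 1, s.2.2)
  else if s.2.2 > 0 then (s.1 + k.1 * 5 + k.2.1 + k.2.2, s.2.1, s.2.2 - 1)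
  else (s.1 + k.1 * 25 + k.2.1 * 5 + k.2.2, s.2.1, s.2.2)

-- the (closed) descending enumeration of the whole key space, exactly in B's loop order
def pvE : List (Int × Int × Int) :=
  (PySem.List.pyRange 5 (-1) (-1)).flatMap
    (fun dia =>
      (PySem.List.pyRange (5 - dia) (-1) (-1)).flatMap
        (fun iron =>
          (PySem.List.pyRange (5 - dia - iron) (-1) (-1)).map (fun stone => (dia, iron, stone))))

def pvMkDic (d it st : Int) : PySem.Dict String Int :=
  ((PySem.Dict.empty.insert "diamond" d).insert "iron" it).insert "stone" st


lemma pvE_nodup : pvE.Nodup := by decide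
lemma pvE_sorted : pvE.Pairwise (fun a b => pvLex b < pvLex a) := by decide

lemma mem_pvE (a b c : Int) (ha : 0 ≤ a) (hb : 0 ≤ b) (hc : 0 ≤ c) (h : a + b + c ≤ 5) :
    (a, b, c) ∈ pvE := by
  unfold pvE
  simp only [List.mem_flatMap, List.mem_map, PySem.List.mem_pyRange_neg_one]
  exact ⟨a, by omega, b, by omega, c, by omega, rfl⟩

lemma count3_le (l : List String) :
    l.count "diamond" + l.count "iron" + l.count "stone" ≤ l.length := by
  induction l with
  | nil => simp
  | cons x xs ih =>
    simp only [List.count_cons, List.length_cons]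
    rcases eq_or_ne x "diamond" with h | h <;> rcases eq_or_ne x "iron" with h2 | h2 <;>
      rcases eq_or_ne x "stone" with h3 | h3 <;> simp_all <;> omega
lemma pvG_d {d : Int} (hd : 0 < d) (a it : Int) (k : Int × Int × Int) :
    pvG (a, d, it) k = (a + k.1 + k.2.1 + k.2.2, d - 1, it) := by
  simp [pvG, hd]

lemma pvG_it {d it : Int} (hd : ¬ 0 < d) (hit : 0 < it) (a : Int) (k : Int × Int × Int) :
    pvG (a, d, it) k = (a + k.1 * 5 + k.2.1 + k.2.2, d, it - 1) := by
  simp [pvG, hd, hit]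

lemma pvG_st {d it : Int} (hd : ¬ 0 < d) (hit : ¬ 0 < it) (a : Int) (k : Int × Int × Int) :
    pvG (a, d, it) k = (a + k.1 * 25 + k.2.1 * 5 + k.2.2, d, it) := by
  simp [pvG, hd, hit]

lemma replicate_pvG (k : Int × Int × Int) :
    ∀ (n : Nat) (a d it : Int),
      (List.replicate n k).foldl pvG (a, d, it) =
        (a + min (n : Int) (max d 0) * (k.1 + k.2.1 + k.2.2)
           + min ((n : Int) - min (n : Int) (max d 0)) (max it 0) * (k.1 * 5 + k.2.1 + k.2.2)
           + ((n : Int) - min (n : Int) (max d 0)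
               - min ((n : Int) - min (n : Int) (max d 0)) (max it 0)) * (k.1 * 25 + k.2.1 * 5 + k.2.2),
         d - min (n : Int) (max d 0),
         it - min ((n : Int) - min (n : Int) (max d 0)) (max it 0)) := by
  intro n
  induction n with
  | zero => intro a d it; simp
  | succ n ih =>
    intro a d it
    rw [List.replicate_succ, List.foldl_cons]
    push_cast
    by_cases hd : 0 < d
    · rw [pvG_d hd, ih]
      rw [show min ((n : Int) + 1) (max d 0) = min (n : Int) (max (d - 1) 0) + 1 from by omega]
      rw [show (n : Int) + 1 - (min (n : Int) (max (d - 1) 0) + 1) = (n : Int) - min (n : Int) (max (d - 1) 0) from by ring]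
      exact Prod.ext (by ring) (Prod.ext (by first | (dsimp only; omega) | dsimp only) (by first | (dsimp only; omega) | dsimp only))
    · by_cases hit : 0 < it
      · rw [pvG_it hd hit, ih]
        rw [show min ((n : Int) + 1) (max d 0) = 0 from by omega,
            show min ((n : Int)) (max d 0) = 0 from by omega]
        rw [show min ((n : Int) + 1 - 0) (max it 0) = min ((n : Int) - 0) (max (it - 1) 0) + 1 from by omega]
        exact Prod.ext (by ring) (Prod.ext (by first | (dsimp only; omega) | dsimp only) (by first | (dsimp only; omega) | dsimp only))
      · rw [pvG_st hd hit, ih]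
        rw [show min ((n : Int) + 1) (max d 0) = 0 from by omega,
            show min ((n : Int)) (max d 0) = 0 from by omega,
            show min ((n : Int) + 1 - 0) (max it 0) = 0 from by omega,
            show min ((n : Int) - 0) (max it 0) = 0 from by omega]
        exact Prod.ext (by ring) (Prod.ext (by first | (dsimp only; omega) | dsimp only) (by first | (dsimp only; omega) | dsimp only))
lemma pvMkDic_getD_d (d it st : Int) : (pvMkDic d it st).getD "diamond" 0 = d := rfl
lemma pvMkDic_getD_i (d it st : Int) : (pvMkDic d it st).getD "iron" 0 = it := rfl
lemma pvMkDic_ins_d (d it st x : Int) : (pvMkDic d it st).insert "diamond" x = pvMkDic x it st := rfl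
lemma pvMkDic_ins_i (d it st x : Int) : (pvMkDic d it st).insert "iron" x = pvMkDic d x st := rfl
lemma pvMkDic_ins_s (d it st x : Int) : (pvMkDic d it st).insert "stone" x = pvMkDic d it x := rfl

lemma aFold (l : List (Int × Int × Int × Int)) :
    ∀ (a d it st : Int),
      (l.foldl
          (fun (s : Int × PySem.Dict String Int) i =>
            let answer := s.1
            let dic := s.2
            if dic.getD "diamond" 0 > 0 then
              (answer + i.2.1 + i.2.2.1 + i.2.2.2, dic.insert "diamond" (dic.getD "diamond" 0 - 1))
            else if dic.getD "iron" 0 > 0 then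
              (answer + i.2.1 * 5 + i.2.2.1 + i.2.2.2, dic.insert "iron" (dic.getD "iron" 0 - 1))
            else
              (answer + i.2.1 * 25 + i.2.2.1 * 5 + i.2.2.2, dic.insert "stone" (dic.getD "stone" 0 - 1)))
          (a, pvMkDic d it st)).1
        = ((l.map pvKeyOf).foldl pvG (a, d, it)).1 := by
  induction l with
  | nil => intro a d it st; rfl
  | cons x xs ih =>
    intro a d it st
    rw [List.foldl_cons, List.map_cons, List.foldl_cons]
    by_cases hd : 0 < d
    · simp only [pvMkDic_getD_d, pvMkDic_getD_i, hd, if_pos, gt_iff_lt, pvMkDic_ins_d]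
      rw [ih, pvG_d hd]
      rfl
    · by_cases hit : 0 < it
      · simp only [pvMkDic_getD_d, pvMkDic_getD_i, hd, hit, if_pos, gt_iff_lt, if_false, pvMkDic_ins_i]
        rw [ih, pvG_it hd hit]
        rfl
      · simp only [pvMkDic_getD_d, pvMkDic_getD_i, hd, hit, gt_iff_lt, if_false, pvMkDic_ins_s]
        rw [ih, pvG_st hd hit]
        rfl
lemma pvLex_inj {a b : Int × Int × Int} (h : pvLex a = pvLex b) : a = b := by
  obtain ⟨a1, a2, a3⟩ := a
  obtain ⟨b1, b2, b3⟩ := b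
  unfold pvLex at h
  have h1 := toLex.injective h
  rw [Prod.mk.injEq] at h1
  have h2 := toLex.injective h1.2
  rw [Prod.mk.injEq] at h2
  exact Prod.ext h1.1 (Prod.ext h2.1 h2.2)

lemma flatMap_replicate_pairwise (E : List (Int × Int × Int)) (cnt : Int × Int × Int → Nat)
    (h : E.Pairwise (fun a b => pvLex b < pvLex a)) :
    (E.flatMap fun k => List.replicate (cnt k) k).Pairwise (fun a b => pvLex b ≤ pvLex a) := by
  induction E with
  | nil => simp
  | cons e es ih =>
    rw [List.pairwise_cons] at h
    rw [List.flatMap_cons, List.pairwise_append]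
    refine ⟨?_, ih h.2, ?_⟩
    · exact List.pairwise_replicate.mpr (Or.inr le_rfl)
    · intro x hx y hy
      rw [List.eq_of_mem_replicate hx]
      rw [List.mem_flatMap] at hy
      obtain ⟨e', he', hy⟩ := hy
      rw [List.eq_of_mem_replicate hy]
      exact le_of_lt (h.1 e' he')

lemma count_flatMap_replicate (E : List (Int × Int × Int)) (cnt : Int × Int × Int → Nat)
    (k : Int × Int × Int) (hnd : E.Nodup) :
    (E.flatMap fun e => List.replicate (cnt e) e).count k = if k ∈ E then cnt k else 0 := by
  induction E with
  | nil => simp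
  | cons e es ih =>
    rw [List.nodup_cons] at hnd
    rw [List.flatMap_cons, List.count_append, ih hnd.2, List.count_replicate]
    by_cases hk : e = k
    · subst hk
      simp [hnd.1]
    · simp [hk, Ne.symm hk]

lemma pvKey_mem_pvE (minerals : List String) (i : Int) (hi : 0 ≤ i) :
    pvKey minerals i ∈ pvE := by
  have h5 : (PySem.List.slice minerals (some i) (some (i + 5))).length ≤ 5 := by
    rw [PySem.List.slice_toNat minerals hi (by omega)]
    calc _ ≤ (i + 5).toNat - i.toNat := List.length_take_le _ _
    _ ≤ 5 := by omega
  have hc := count3_le (PySem.List.slice minerals (some i) (some (i + 5)))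
  unfold pvKey
  refine mem_pvE _ _ _ (by positivity) (by positivity) (by positivity) ?_
  simp only [PySem.List.count]
  push_cast
  omega

lemma body_eq (n : Nat) (a d it : Int) (k : Int × Int × Int) :
    ((a + (if d > 0 then min (n : Int) d else 0) * (k.1 + k.2.1 + k.2.2)
        + (if it > 0 then min ((n : Int) - (if d > 0 then min (n : Int) d else 0)) it else 0) * (k.1 * 5 + k.2.1 + k.2.2)
        + ((n : Int) - (if d > 0 then min (n : Int) d else 0)
            - (if it > 0 then min ((n : Int) - (if d > 0 then min (n : Int) d else 0)) it else 0)) * (k.1 * 25 + k.2.1 * 5 + k.2.2),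
      d - (if d > 0 then min (n : Int) d else 0),
      it - (if it > 0 then min ((n : Int) - (if d > 0 then min (n : Int) d else 0)) it else 0)) : Int × Int × Int)
      = (List.replicate n k).foldl pvG (a, d, it) := by
  rw [replicate_pvG]
  rw [show (if d > 0 then min (n : Int) d else 0) = min (n : Int) (max d 0) from by split_ifs <;> omega]
  rw [show (if it > 0 then min ((n : Int) - min (n : Int) (max d 0)) it else 0)
        = min ((n : Int) - min (n : Int) (max d 0)) (max it 0) from by split_ifs <;> omega]
lemma pvE_foldl (f : (Int × Int × Int) → Int → Int → Int → (Int × Int × Int)) (s₀ : Int × Int × Int) :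
    (PySem.List.pyRange 5 (-1) (-1)).foldl
      (fun s dia =>
        (PySem.List.pyRange (5 - dia) (-1) (-1)).foldl
          (fun s iron =>
            (PySem.List.pyRange (5 - dia - iron) (-1) (-1)).foldl
              (fun s stone => f s dia iron stone) s) s) s₀
    = pvE.foldl (fun s k => f s k.1 k.2.1 k.2.2) s₀ := by
  unfold pvE
  simp only [List.foldl_flatMap, List.foldl_map]

lemma core (minerals : List String) (lim p0 p1 p2 : Int) :
    ((PySem.List.sorted
        ((PySem.List.pyRange 0 lim 5).map (fun i => (i, pvKey minerals i)))
        (fun x => pvLex x.2) true).foldl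
      (fun (s : Int × PySem.Dict String Int) i =>
        let answer := s.1
        let dic := s.2
        if dic.getD "diamond" 0 > 0 then
          (answer + i.2.1 + i.2.2.1 + i.2.2.2, dic.insert "diamond" (dic.getD "diamond" 0 - 1))
        else if dic.getD "iron" 0 > 0 then
          (answer + i.2.1 * 5 + i.2.2.1 + i.2.2.2, dic.insert "iron" (dic.getD "iron" 0 - 1))
        else
          (answer + i.2.1 * 25 + i.2.2.1 * 5 + i.2.2.2, dic.insert "stone" (dic.getD "stone" 0 - 1)))
      (0, pvMkDic p0 p1 p2)).1
    = (pvE.foldl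
        (fun s k =>
          (List.replicate (((PySem.List.pyRange 0 lim 5).map (pvKey minerals)).count k) k).foldl pvG s)
        (0, p0, p1)).1 := by
  rw [aFold]
  have hperm1 : ((PySem.List.sorted
      ((PySem.List.pyRange 0 lim 5).map (fun i => (i, pvKey minerals i)))
      (fun x => pvLex x.2) true).map pvKeyOf).Perm
      ((PySem.List.pyRange 0 lim 5).map (pvKey minerals)) := by
    have h := (PySem.List.sorted_perm
      ((PySem.List.pyRange 0 lim 5).map (fun i => (i, pvKey minerals i)))
      (fun x => pvLex x.2) true).map pvKeyOf
    rw [List.map_map] at h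
    exact h
  have hsorted1 : ((PySem.List.sorted
      ((PySem.List.pyRange 0 lim 5).map (fun i => (i, pvKey minerals i)))
      (fun x => pvLex x.2) true).map pvKeyOf).Pairwise (fun a b => pvLex b ≤ pvLex a) := by
    have h := PySem.List.sorted_pairwise_rev
      ((PySem.List.pyRange 0 lim 5).map (fun i => (i, pvKey minerals i)))
      (fun x => pvLex x.2)
    exact List.pairwise_map.mpr h
  have hperm2 : (pvE.flatMap fun k =>
      List.replicate (((PySem.List.pyRange 0 lim 5).map (pvKey minerals)).count k) k).Perm
      ((PySem.List.pyRange 0 lim 5).map (pvKey minerals)) := by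
    rw [List.perm_iff_count]
    intro a
    rw [count_flatMap_replicate _ _ _ pvE_nodup]
    by_cases ha : a ∈ pvE
    · simp [ha]
    · simp only [ha, if_false]
      symm
      rw [List.count_eq_zero]
      intro hmem
      rw [List.mem_map] at hmem
      obtain ⟨i, hi, rfl⟩ := hmem
      have hi0 : 0 ≤ i := by
        rw [PySem.List.mem_pyRange_iff_of_pos (by omega)] at hi
        omega
      exact ha (pvKey_mem_pvE minerals i hi0)
  have heq : (PySem.List.sorted
      ((PySem.List.pyRange 0 lim 5).map (fun i => (i, pvKey minerals i)))
      (fun x => pvLex x.2) true).map pvKeyOf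
      = pvE.flatMap fun k =>
        List.replicate (((PySem.List.pyRange 0 lim 5).map (pvKey minerals)).count k) k := by
    refine List.Perm.eq_of_pairwise ?_ hsorted1
      (flatMap_replicate_pairwise pvE _ pvE_sorted) (hperm1.trans hperm2.symm)
    intro a b _ _ h1 h2
    exact pvLex_inj (le_antisymm h2 h1)
  rw [heq, List.foldl_flatMap]
lemma bucket_fold_eq (minerals : List String) (lim : Int) :
    (PySem.List.pyRange 0 lim 5).foldl
      (fun (d : PySem.Dict (Int × Int × Int) Int) i =>
        d.insert
          ((PySem.List.count (PySem.List.slice minerals (some i) (some (i + 5))) "diamond" : Int),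
            (PySem.List.count (PySem.List.slice minerals (some i) (some (i + 5))) "iron" : Int),
            (PySem.List.count (PySem.List.slice minerals (some i) (some (i + 5))) "stone" : Int))
          (d.getD
            ((PySem.List.count (PySem.List.slice minerals (some i) (some (i + 5))) "diamond" : Int),
              (PySem.List.count (PySem.List.slice minerals (some i) (some (i + 5))) "iron" : Int),
              (PySem.List.count (PySem.List.slice minerals (some i) (some (i + 5))) "stone" : Int)) 0 + 1))
      PySem.Dict.empty
    = ((PySem.List.pyRange 0 lim 5).map (pvKey minerals)).foldl
        (fun d x => d.insert x (d.getD x 0 + 1)) PySem.Dict.empty := by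
  rw [List.foldl_map]
  rfl

theorem solution_eq (picks : List Int) (minerals : List String) :
    solution picks minerals = solution_alt picks minerals := by
  have hA : solution picks minerals =
      ((PySem.List.sorted
          ((PySem.List.pyRange 0 (min (PySem.List.len minerals) (picks.sum * 5)) 5).map
            (fun i => (i, pvKey minerals i)))
          (fun x => pvLex x.2) true).foldl
        (fun (s : Int × PySem.Dict String Int) i =>
          let answer := s.1
          let dic := s.2
          if dic.getD "diamond" 0 > 0 then
            (answer + i.2.1 + i.2.2.1 + i.2.2.2, dic.insert "diamond" (dic.getD "diamond" 0 - 1))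
          else if dic.getD "iron" 0 > 0 then
            (answer + i.2.1 * 5 + i.2.2.1 + i.2.2.2, dic.insert "iron" (dic.getD "iron" 0 - 1))
          else
            (answer + i.2.1 * 25 + i.2.2.1 * 5 + i.2.2.2, dic.insert "stone" (dic.getD "stone" 0 - 1)))
        (0, pvMkDic (PySem.List.pyGetD picks 0 0) (PySem.List.pyGetD picks 1 0)
          (PySem.List.pyGetD picks 2 0))).1 := by
    unfold solution
    simp only [PySem.List.foldl_append_singleton_eq_map, List.nil_append]
    rfl
  have hB : solution_alt picks minerals =
      (pvE.foldl
        (fun s k =>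
          (List.replicate
            (((PySem.List.pyRange 0 (min (PySem.List.len minerals) (picks.sum * 5)) 5).map
              (pvKey minerals)).count k) k).foldl pvG s)
        (0, PySem.List.pyGetD picks 0 0, PySem.List.pyGetD picks 1 0)).1 := by
    unfold solution_alt
    dsimp only
    rw [pvE_foldl]
    simp only [bucket_fold_eq, PySem.Dict.getD_foldl_insert_add_one, PySem.Dict.getD_empty,
      zero_add]
    simp only [body_eq]
  rw [hA, hB]
  exact core minerals (min (PySem.List.len minerals) (picks.sum * 5))
    (PySem.List.pyGetD picks 0 0) (PySem.List.pyGetD picks 1 0) (PySem.List.pyGetD picks 2 0)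

-- ===== VERDICT (by name: the statement is the Claim_ definition above) =====
theorem solution_spec : Claim_equal_solution := by
  intro picks minerals _ _
  unfold Spec_solution
  exact solution_eq picks minerals
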